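-- pv_equiv track=rewrite | github.com/ai-meharbnsingh/astro_rattan | app/stri_jataka_engine.py | _score_prospect
-- ===== SOURCE A (Python) =====
-- from typing import Any, Dict, List, Optional
--
-- def _score_prospect(yogas: List[Dict[str, Any]], sa: Dict[str, Any]) -> str:
--     auspicious = sum(1 for y in yogas if y.get("severity") == "auspicious")
--     challenging = sum(1 for y in yogas if y.get("severity") in ("challenging", "high"))
--     moderate = sum(1 for y in yogas if y.get("severity") == "moderate")
--
--     if auspicious >= 2 and challenging == 0:
--         return "favorable"
--     if challenging >= 1 and auspicious == 0:
--         return "challenging"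
--     if auspicious >= 1 and challenging == 0 and sa.get("seventh_lord_strength") != "weak":
--         return "favorable"
--     if sa.get("seventh_lord_strength") == "weak" and auspicious == 0:
--         return "challenging"
--     if auspicious == 0 and challenging == 0 and moderate == 0:
--         # Nothing special — use 7th house interpretation as fallback
--         return "favorable" if sa.get("seventh_lord_strength") == "strong" else "mixed"
--     return "mixed"
-- ===== SOURCE B (Python) =====
-- from typing import Any, Dict, List, Optional
--
-- def _score_prospect(yogas: List[Dict[str, Any]], sa: Dict[str, Any]) -> str:
--     # Different algorithm: no counts at all. One pass maintains four saturating
--     # boolean flags (seen one auspicious, seen a second, seen challenging/high,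
--     # seen moderate); the decision is a restructured nested case split on the
--     # flags rather than A's flat threshold chain over integer counts.
--     a = a2 = c = m = False
--     for y in yogas:
--         sev = y.get("severity")
--         if sev == "auspicious":
--             a2 = a2 or a
--             a = True
--         elif sev in ("challenging", "high"):
--             c = True
--         elif sev == "moderate":
--             m = True
--     s = sa.get("seventh_lord_strength")
--     if c:
--         return "mixed" if a else "challenging"
--     if a:
--         return "favorable" if (a2 or s != "weak") else "mixed"
--     if s == "weak":
--         return "challenging"
--     if m:
--         return "mixed"
--     return "favorable" if s == "strong" else "mixed"
-- ===== Notes on version B (the rewrite author's own statement) =====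
-- stated objective: alternative
-- what changed: B keeps no integer counts: a single pass maintains four saturating boolean flags (one auspicious seen, a second auspicious seen, any challenging/high, any moderate), and the flat five-rule threshold chain is replaced by a restructured nested case split on those flags (challenging-first, then auspicious, then weak/moderate/strong).
import Mathlib
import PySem

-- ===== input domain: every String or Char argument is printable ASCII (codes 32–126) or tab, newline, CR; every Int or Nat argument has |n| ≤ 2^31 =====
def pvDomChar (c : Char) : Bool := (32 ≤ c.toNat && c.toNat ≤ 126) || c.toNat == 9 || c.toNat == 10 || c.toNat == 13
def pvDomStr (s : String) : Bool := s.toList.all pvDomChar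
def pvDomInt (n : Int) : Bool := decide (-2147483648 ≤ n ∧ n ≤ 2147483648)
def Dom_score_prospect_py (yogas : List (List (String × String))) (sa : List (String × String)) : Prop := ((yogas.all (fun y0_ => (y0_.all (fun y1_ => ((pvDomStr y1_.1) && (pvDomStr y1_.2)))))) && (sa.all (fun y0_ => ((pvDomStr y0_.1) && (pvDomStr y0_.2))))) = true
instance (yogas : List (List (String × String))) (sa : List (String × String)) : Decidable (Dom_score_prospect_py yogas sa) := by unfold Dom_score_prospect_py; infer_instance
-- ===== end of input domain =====

-- B keeps no integer counts: one pass maintains four saturating boolean flags and a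
-- restructured nested case split replaces A's flat threshold chain (objective: alternative).

-- ===== PORT A =====
-- A: three independent 'sum(1 for y in yogas if …)' scans, then the five-rule chain.
def score_prospect_py (yogas : List (List (String × String))) (sa : List (String × String)) : String :=
  let auspicious : Int := yogas.foldl
    (fun acc y => if (PySem.Dict.mk y).get? "severity" == some "auspicious" then acc + 1 else acc) 0
  let challenging : Int := yogas.foldl
    (fun acc y => if ((PySem.Dict.mk y).get? "severity" == some "challenging"
                      || (PySem.Dict.mk y).get? "severity" == some "high") then acc + 1 else acc) 0
  let moderate : Int := yogas.foldl
    (fun acc y => if (PySem.Dict.mk y).get? "severity" == some "moderate" then acc + 1 else acc) 0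
  if auspicious ≥ 2 && challenging == 0 then "favorable"
  else if challenging ≥ 1 && auspicious == 0 then "challenging"
  else if auspicious ≥ 1 && challenging == 0
          && !((PySem.Dict.mk sa).get? "seventh_lord_strength" == some "weak") then "favorable"
  else if (PySem.Dict.mk sa).get? "seventh_lord_strength" == some "weak" && auspicious == 0 then "challenging"
  else if auspicious == 0 && challenging == 0 && moderate == 0 then
    (if (PySem.Dict.mk sa).get? "seventh_lord_strength" == some "strong" then "favorable" else "mixed")
  else "mixed"

-- ===== PORT B =====
-- B: one pass over yogas maintaining flags (a, a2, c, m); nested case split afterwards.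
def score_prospect_py_alt (yogas : List (List (String × String))) (sa : List (String × String)) : String :=
  let st : Bool × Bool × Bool × Bool := yogas.foldl
    (fun st y =>
      let sev := (PySem.Dict.mk y).get? "severity"
      if sev == some "auspicious" then (true, st.2.1 || st.1, st.2.2.1, st.2.2.2)
      else if sev == some "challenging" || sev == some "high" then (st.1, st.2.1, true, st.2.2.2)
      else if sev == some "moderate" then (st.1, st.2.1, st.2.2.1, true)
      else st)
    (false, false, false, false)
  let a := st.1
  let a2 := st.2.1
  let c := st.2.2.1
  let m := st.2.2.2
  let s := (PySem.Dict.mk sa).get? "seventh_lord_strength"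
  if c then (if a then "mixed" else "challenging")
  else if a then (if a2 || !(s == some "weak") then "favorable" else "mixed")
  else if s == some "weak" then "challenging"
  else if m then "mixed"
  else if s == some "strong" then "favorable" else "mixed"

-- ===== PRECONDITION & SPEC =====
def Spec_score_prospect_py (yogas : List (List (String × String))) (sa : List (String × String)) (out : String) : Prop := out = score_prospect_py_alt yogas sa
instance (yogas : List (List (String × String))) (sa : List (String × String)) (out : String) : Decidable (Spec_score_prospect_py yogas sa out) := by unfold Spec_score_prospect_py; infer_instance

-- ===== CLAIM (what is proved, stated in full; the proofs are below) =====
def Claim_equal_score_prospect_py : Prop := ∀ (yogas : List (List (String × String))) (sa : List (String × String)), Dom_score_prospect_py yogas sa → Spec_score_prospect_py yogas sa (score_prospect_py yogas sa)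

-- ===== LEMMAS AND PROOFS =====

-- shorthand predicates used only by the proofs
def pvA (y : List (String × String)) : Bool := (PySem.Dict.mk y).get? "severity" == some "auspicious"
def pvC (y : List (String × String)) : Bool :=
  (PySem.Dict.mk y).get? "severity" == some "challenging" || (PySem.Dict.mk y).get? "severity" == some "high"
def pvM (y : List (String × String)) : Bool := (PySem.Dict.mk y).get? "severity" == some "moderate"

-- B's flag fold computed from the three counts, for an arbitrary start state
theorem flags_fold (yogas : List (List (String × String))) (a a2 c m : Bool) :
    yogas.foldl
      (fun st y =>
        let sev := (PySem.Dict.mk y).get? "severity"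
        if sev == some "auspicious" then (true, st.2.1 || st.1, st.2.2.1, st.2.2.2)
        else if sev == some "challenging" || sev == some "high" then (st.1, st.2.1, true, st.2.2.2)
        else if sev == some "moderate" then (st.1, st.2.1, st.2.2.1, true)
        else st)
      (a, a2, c, m)
    = (a || decide (1 ≤ yogas.countP pvA),
       a2 || (a && decide (1 ≤ yogas.countP pvA)) || decide (2 ≤ yogas.countP pvA),
       c || decide (1 ≤ yogas.countP pvC),
       m || decide (1 ≤ yogas.countP pvM)) := by
  induction yogas generalizing a a2 c m with
  | nil => simp
  | cons y ys ih =>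
      simp only [List.foldl_cons, List.countP_cons]
      by_cases hA : pvA y = true
      · have hC : pvC y = false := by
          simp only [pvA, beq_iff_eq] at hA; simp [pvC, hA]
        have hM : pvM y = false := by
          simp only [pvA, beq_iff_eq] at hA; simp [pvM, hA]
        have hA' := hA; have hC' := hC; have hM' := hM
        simp only [pvA, pvC, pvM] at hA' hC' hM'
        simp only [hA', hC', hM', if_true, if_false, ih, hA, hC, hM]
        rcases Nat.eq_zero_or_pos (ys.countP pvA) with h0 | h1
        · simp [h0]
        · have hex : ∃ x ∈ ys, pvA x = true := List.countP_pos_iff.mp h1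
          simp [show 2 ≤ ys.countP pvA + 1 by omega, show 1 ≤ ys.countP pvA + 1 by omega, hex]
      · by_cases hC : pvC y = true
        · have hM : pvM y = false := by
            simp only [pvC, Bool.or_eq_true, beq_iff_eq] at hC
            rcases hC with h | h <;> simp [pvM, h]
          have hA'' : pvA y = false := by simpa using hA
          have hA' := hA''; have hC' := hC; have hM' := hM
          simp only [pvA, pvC, pvM] at hA' hC' hM'
          simp only [hA', hC', hM', if_true, if_false, ih, hA'', hC, hM]
          simp [show 1 ≤ ys.countP pvC + 1 by omega]
        · by_cases hM : pvM y = true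
          · have hA'' : pvA y = false := by simpa using hA
            have hC'' : pvC y = false := by simpa using hC
            have hA' := hA''; have hC' := hC''; have hM' := hM
            simp only [pvA, pvC, pvM] at hA' hC' hM'
            simp only [hA', hC', hM', if_true, if_false, ih, hA'', hC'', hM]
            simp [show 1 ≤ ys.countP pvM + 1 by omega]
          · have hA'' : pvA y = false := by simpa using hA
            have hC'' : pvC y = false := by simpa using hC
            have hM'' : pvM y = false := by simpa using hM
            have hA' := hA''; have hC' := hC''; have hM' := hM''
            simp only [pvA, pvC, pvM] at hA' hC' hM'
            simp only [hA', hC', hM', if_true, if_false, ih, hA'', hC'', hM'']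
            simp

-- the two decision blocks agree, as a pure fact about the counts and the two flags
set_option maxHeartbeats 2000000 in
theorem chain_eq (nA nC nM : Nat) (w t : Bool) :
    (if ((nA : Int) ≥ 2 && (nC : Int) == 0) then "favorable"
     else if ((nC : Int) ≥ 1 && (nA : Int) == 0) then "challenging"
     else if ((nA : Int) ≥ 1 && (nC : Int) == 0 && !w) then "favorable"
     else if (w && (nA : Int) == 0) then "challenging"
     else if ((nA : Int) == 0 && (nC : Int) == 0 && (nM : Int) == 0) then
       (if t then "favorable" else "mixed")
     else "mixed")
    = (if decide (1 ≤ nC) then (if decide (1 ≤ nA) then "mixed" else "challenging")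
       else if decide (1 ≤ nA) then (if (decide (2 ≤ nA) || !w) then "favorable" else "mixed")
       else if w then "challenging"
       else if decide (1 ≤ nM) then "mixed"
       else if t then "favorable" else "mixed") := by
  cases w <;> cases t <;> split_ifs <;> first | rfl | (simp_all <;> omega)

-- ===== VERDICT (by name: the statement is the Claim_ definition above) =====
theorem score_prospect_py_spec : Claim_equal_score_prospect_py := by
  intro yogas sa _
  unfold Spec_score_prospect_py score_prospect_py score_prospect_py_alt
  rw [flags_fold]
  simp only [PySem.List.foldl_if_add_one, zero_add, Bool.false_or, Bool.false_and,
    Bool.or_false]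
  exact chain_eq (yogas.countP pvA) (yogas.countP pvC) (yogas.countP pvM)
    ((PySem.Dict.mk sa).get? "seventh_lord_strength" == some "weak")
    ((PySem.Dict.mk sa).get? "seventh_lord_strength" == some "strong")
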